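-- pv_equiv track=rewrite | github.com/hil679/Algorithm_programmers | level 0/문자열밀기.py | solution
-- ===== SOURCE A (Python) =====
-- from collections import deque
--
-- def solution(A, B):
--     c_A , c_B= deque(A), deque(B)
--     n = 0
--     while(n<len(c_A)):
--         if  c_A == c_B:
--             return n
--         c_A.rotate(1)
--         n += 1
--     return -1
-- ===== SOURCE B (Python) =====
-- def solution(A, B):
--     n = len(A)
--     if n != len(B) or n == 0:
--         return -1
--     if A == B:
--         return 0
--     i = (A + A).rfind(B, 1, 2 * n - 1)
--     return n - i if i != -1 else -1
-- ===== Notes on version B (the rewrite author's own statement) =====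
-- stated objective: faster
-- what changed: Replaces the rotate-and-compare loop over all n right-rotations by a single reverse substring search of B in A+A (rfind), mapping the match position back to the smallest rotation count.
import Mathlib
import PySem

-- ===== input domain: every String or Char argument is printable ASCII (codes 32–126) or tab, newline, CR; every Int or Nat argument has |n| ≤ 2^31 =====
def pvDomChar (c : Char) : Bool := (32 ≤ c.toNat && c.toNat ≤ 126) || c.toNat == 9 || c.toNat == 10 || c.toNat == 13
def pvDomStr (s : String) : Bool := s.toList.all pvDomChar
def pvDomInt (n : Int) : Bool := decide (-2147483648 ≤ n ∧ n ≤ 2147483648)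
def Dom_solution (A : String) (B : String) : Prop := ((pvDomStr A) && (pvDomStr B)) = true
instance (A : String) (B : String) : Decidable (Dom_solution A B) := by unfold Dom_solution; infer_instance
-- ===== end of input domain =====

-- B replaces A's n-step rotate-and-compare loop by a single reverse substring search of B in A+A (rfind), mapping the match position back to the smallest rotation count.

-- ===== PORT A =====
-- deque.rotate(1): the last element moves to the front
def rot1 (l : List Char) : List Char :=
  match l.getLast? with
  | none => []
  | some x => x :: l.dropLast

-- the while loop: fuel = len(c_A) - n iterations remain
def solLoopA (cB : List Char) : Nat → List Char → Nat → Int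
  | 0, _, _ => -1
  | f + 1, cA, n => if cA = cB then (n : Int) else solLoopA cB f (rot1 cA) (n + 1)

def solution (A : String) (B : String) : Int :=
  solLoopA B.toList A.toList.length A.toList 0

-- ===== PORT B =====
-- str.rfind(B, 1, 2n-1) on A+A: largest position i with 1 ≤ i ≤ n-1 and (A+A)[i:i+|B|] = B,
-- else -1; rfindAux scans positions i, i-1, …, 1 downward, exactly Python's rfind semantics here.
def rfindAux (D b : List Char) : Nat → Int
  | 0 => -1
  | i + 1 => if (D.drop (i + 1)).take b.length = b then ((i : Int) + 1) else rfindAux D b i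

def solution_alt (A : String) (B : String) : Int :=
  let a := A.toList
  let b := B.toList
  let n := a.length
  if n ≠ b.length ∨ n = 0 then -1
  else if a = b then 0
  else
    let i := rfindAux (a ++ a) b (n - 1)
    if i ≠ -1 then (n : Int) - i else -1

-- ===== PRECONDITION & SPEC =====
def Spec_solution (A : String) (B : String) (out : Int) : Prop := out = solution_alt A B
instance (A : String) (B : String) (out : Int) : Decidable (Spec_solution A B out) := by unfold Spec_solution; infer_instance

-- ===== CLAIM (what is proved, stated in full; the proofs are below) =====
def Claim_equal_solution : Prop := ∀ (A : String) (B : String), Dom_solution A B → Spec_solution A B (solution A B)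

-- ===== LEMMAS AND PROOFS =====

theorem rot1_length (l : List Char) : (rot1 l).length = l.length := by
  unfold rot1
  cases l with
  | nil => simp
  | cons x xs =>
    rw [List.getLast?_eq_some_iff.mpr ⟨(x::xs).dropLast, (List.dropLast_concat_getLast (by simp)).symm⟩]
    simp

-- if the lengths differ the loop never hits the equality branch
theorem solLoopA_ne (cB : List Char) (f : Nat) : ∀ (cA : List Char) (n : Nat),
    cA.length ≠ cB.length → solLoopA cB f cA n = -1 := by
  induction f with
  | zero => intro cA n h; rfl
  | succ f ih =>
    intro cA n h
    unfold solLoopA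
    rw [if_neg (fun e => h (by rw [e]))]
    exact ih _ _ (by rw [rot1_length]; exact h)

theorem rot1_snoc (l : List Char) (x : Char) : rot1 (l ++ [x]) = x :: l := by
  unfold rot1
  rw [List.getLast?_concat]
  simp

-- k right rotations in closed form
theorem rot1_iter (a : List Char) (k : Nat) (hk : k ≤ a.length) :
    rot1^[k] a = a.drop (a.length - k) ++ a.take (a.length - k) := by
  induction k with
  | zero => simp
  | succ k ih =>
    rw [Function.iterate_succ_apply', ih (Nat.le_of_succ_le hk)]
    set m := a.length - (k + 1) with hm
    have hma : m < a.length := by omega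
    have hlen : a.length - k = m + 1 := by omega
    rw [hlen, List.take_succ_eq_append_getElem hma, ← List.append_assoc, rot1_snoc]
    have hdm : List.drop m a = a[m] :: List.drop (m+1) a := List.drop_eq_getElem_cons hma
    rw [hdm]
    rfl

theorem drop_dd (a : List Char) (j : Nat) (hj : j ≤ a.length) :
    (a ++ a).drop j = a.drop j ++ a := by
  rw [List.drop_append]
  have : j - a.length = 0 := by omega
  rw [this, List.drop_zero]

-- the length-|B| slice of A+A at position j is the right rotation of A by |A|-j
theorem slice_dd (a b : List Char) (hlen : a.length = b.length) (j : Nat) (hj : j ≤ a.length) :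
    ((a ++ a).drop j).take b.length = a.drop j ++ a.take j := by
  rw [drop_dd a j hj, List.take_append]
  have h1 : (a.drop j).length = a.length - j := by simp
  have h2 : b.length - (a.drop j).length = j := by omega
  rw [h2, List.take_of_length_le (by omega)]

-- main correspondence: with f iterations of fuel left, A's loop computes exactly
-- the translation of the downward rfind scan over the remaining positions f, …, 1
theorem loop_eq_rfind (a b : List Char) (hlen : a.length = b.length) :
    ∀ f, f ≤ a.length →
    solLoopA b f (rot1^[a.length - f] a) (a.length - f) =
      (if rfindAux (a ++ a) b f = -1 then -1 else (a.length : Int) - rfindAux (a ++ a) b f) := by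
  intro f
  induction f with
  | zero => intro _; rfl
  | succ f ih =>
    intro hf
    have hcond : (rot1^[a.length - (f+1)] a = b) ↔ (((a ++ a).drop (f + 1)).take b.length = b) := by
      rw [slice_dd a b hlen (f+1) hf, rot1_iter a (a.length - (f+1)) (by omega)]
      have : a.length - (a.length - (f+1)) = f + 1 := by omega
      rw [this]
    unfold solLoopA rfindAux
    by_cases hc : ((a ++ a).drop (f + 1)).take b.length = b
    · rw [if_pos (hcond.mpr hc), if_pos hc]
      have hne : ((f : Int) + 1) ≠ -1 := by omega
      rw [if_neg hne]
      omega
    · rw [if_neg (fun e => hc (hcond.mp e)), if_neg hc]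
      have harg : rot1 (rot1^[a.length - (f+1)] a) = rot1^[a.length - f] a := by
        rw [← Function.iterate_succ_apply' rot1 (a.length - (f+1)) a]
        congr 1
        omega
      have hn : a.length - (f + 1) + 1 = a.length - f := by omega
      rw [harg, hn]
      exact ih (by omega)

-- ===== VERDICT (by name: the statement is the Claim_ definition above) =====
theorem solution_spec : Claim_equal_solution := by
  intro A B _
  unfold Spec_solution
  set a := A.toList with ha'
  set b := B.toList with hb'
  have halt : solution_alt A B =
      (if a.length ≠ b.length ∨ a.length = 0 then -1
       else if a = b then 0
       else if rfindAux (a ++ a) b (a.length - 1) ≠ -1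
            then (a.length : Int) - rfindAux (a ++ a) b (a.length - 1) else -1) := rfl
  have hsol : solution A B = solLoopA b a.length a 0 := rfl
  rw [halt, hsol]
  by_cases hlen : a.length = b.length
  · by_cases hz : a.length = 0
    · have hanil : a = [] := List.eq_nil_of_length_eq_zero hz
      rw [if_pos (Or.inr hz), hanil]
      rfl
    · rw [if_neg (by push Not; exact ⟨hlen, hz⟩)]
      have h := loop_eq_rfind a b hlen a.length (le_refl _)
      rw [Nat.sub_self, Function.iterate_zero_apply] at h
      have hnn : a.length = (a.length - 1) + 1 := by omega
      have hsliceA : ((a ++ a).drop ((a.length - 1) + 1)).take b.length = a := by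
        rw [← hnn, drop_dd a a.length (le_refl _), List.drop_length, List.nil_append,
            ← hlen, List.take_length]
      have hRn : rfindAux (a ++ a) b a.length =
          (if a = b then (a.length : Int) else rfindAux (a ++ a) b (a.length - 1)) := by
        conv_lhs => rw [hnn]
        rw [show rfindAux (a ++ a) b ((a.length - 1) + 1) =
              (if ((a ++ a).drop ((a.length - 1) + 1)).take b.length = b
               then ((a.length - 1 : Nat) : Int) + 1
               else rfindAux (a ++ a) b (a.length - 1)) from rfl]
        rw [hsliceA]
        by_cases hab : a = b
        · rw [if_pos hab, if_pos hab]
          omega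
        · rw [if_neg hab, if_neg hab]
      rw [hRn] at h
      by_cases hab : a = b
      · rw [if_pos hab] at h
        rw [if_neg (show ¬((a.length : Int) = -1) by omega)] at h
        rw [if_pos hab, h]
        omega
      · rw [if_neg hab] at h
        rw [if_neg hab, h]
        by_cases hR : rfindAux (a ++ a) b (a.length - 1) = -1
        · rw [if_pos hR, if_neg (by simpa using hR)]
        · rw [if_neg hR, if_pos hR]
  · rw [if_pos (Or.inl hlen), solLoopA_ne b a.length a 0 hlen]
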